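-- pv_equiv track=rewrite | github.com/ParkerWilliams/Math260_Topological_Data_Analysis | VS_for_perseus.py | k_subsets_i
-- ===== SOURCE A (Python) =====
-- def k_subsets_i(n, k):
--     '''
--     Yield each subset of size k from the set of intergers 0 .. n - 1
--     n -- an integer > 0
--     k -- an integer > 0
--     '''
--     # Validate args
--     if n < 0:
--         raise ValueError('n must be > 0, got n=%d' % n)
--     if k < 0:
--         raise ValueError('k must be > 0, got k=%d' % k)
--     # check base cases
--     if k == 0 or n < k:
--         yield set()
--     elif n == k:
--         yield set(range(n))
--
--     else:
--         # Use recursive formula based on binomial coeffecients: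
--         # choose(n, k) = choose(n - 1, k - 1) + choose(n - 1, k)
--         for s in k_subsets_i(n - 1, k - 1):
--             s.add(n - 1)
--             yield s
--         for s in k_subsets_i(n - 1, k):
--             yield s
-- ===== SOURCE B (Python) =====
-- def k_subsets_i(n, k):
--     '''
--     Yield each subset of size k from the set of integers 0 .. n - 1,
--     in the same order as the recursive version, but computed by an
--     iterative Pascal-triangle dynamic program instead of recursion.
--     '''
--     if n < 0:
--         raise ValueError('n must be > 0, got n=%d' % n)
--     if k < 0:
--         raise ValueError('k must be > 0, got k=%d' % k)
--     if k == 0 or n < k: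
--         yield set()
--         return
--     # L[j] = all j-subsets of {0..m-1} as sorted lists, in colex order
--     L = [[[]]] + [[] for _ in range(k)]
--     for m in range(n):
--         L = [L[0]] + [L[j] + [s + [m] for s in L[j - 1]] for j in range(1, k + 1)]
--     for s in reversed(L[k]):
--         yield set(s)
-- ===== Notes on version B (the rewrite author's own statement) =====
-- stated objective: alternative
-- what changed: Replaces A's two-branch binomial recursion (with in-place set mutation) by an iterative Pascal-triangle dynamic program: one pass over m = 0..n-1 maintains a table L[j] of all j-subsets of {0..m-1} in colex order, and the result is L[k] reversed.
import Mathlib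
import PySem

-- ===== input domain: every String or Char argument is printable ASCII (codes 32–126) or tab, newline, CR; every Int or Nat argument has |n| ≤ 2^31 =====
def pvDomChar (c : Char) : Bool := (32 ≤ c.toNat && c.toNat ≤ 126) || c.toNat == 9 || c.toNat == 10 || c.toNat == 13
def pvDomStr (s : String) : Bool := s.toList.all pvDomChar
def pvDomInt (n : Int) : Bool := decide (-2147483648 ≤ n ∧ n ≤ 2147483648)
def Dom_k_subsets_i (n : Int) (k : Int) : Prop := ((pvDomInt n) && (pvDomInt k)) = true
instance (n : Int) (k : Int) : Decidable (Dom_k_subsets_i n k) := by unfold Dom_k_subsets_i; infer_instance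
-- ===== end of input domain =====

-- B replaces A's binomial recursion by an iterative Pascal-triangle DP over m = 0..n-1
-- (objective: alternative — a structurally different, non-recursive enumeration; not measured faster).
-- Both versions are generators in Python; the ports return the list of yielded sets.

-- ===== PORT A =====
-- the recursive generator body, on the Nat images of n and k (A has already rejected negatives)
def kSubAuxA (n : Nat) (k : Nat) : List (List Int) :=
  if k = 0 ∨ n < k then [[]]
  else if n = k then [PySem.Set.ofList ((List.range n).map (fun i : Nat => (i : Int)))]
  else
    -- for s in k_subsets_i(n-1, k-1): s.add(n-1); yield s   then   for s in k_subsets_i(n-1, k): yield s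
    ((kSubAuxA (n - 1) (k - 1)).map (fun s => PySem.Set.add s ((n : Int) - 1)))
      ++ kSubAuxA (n - 1) k
termination_by n
decreasing_by all_goals omega

def k_subsets_i (n : Int) (k : Int) : List (List Int) :=
  if n < 0 then []        -- raise ValueError (outside Pre_)
  else if k < 0 then []   -- raise ValueError (outside Pre_)
  else kSubAuxA n.toNat k.toNat

-- ===== PORT B =====
-- one DP step: L = [L[0]] + [L[j] + [s + [m] for s in L[j-1]] for j in range(1, k+1)]
-- (all indices are provably in range, so List.getD is exact here)
def kSubStepB (k : Nat) (m : Int) (L : List (List (List Int))) : List (List (List Int)) :=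
  [L.getD 0 []] ++ (List.range k).map (fun j => L.getD (j + 1) [] ++ (L.getD j []).map (fun s => s ++ [m]))

def k_subsets_i_alt (n : Int) (k : Int) : List (List Int) :=
  if n < 0 then []        -- raise ValueError (outside Pre_)
  else if k < 0 then []   -- raise ValueError (outside Pre_)
  else if k = 0 ∨ n < k then [[]]
  else
    let kk := k.toNat
    let L := (List.range n.toNat).foldl (fun L (m : Nat) => kSubStepB kk (m : Int) L)
                ([[[]]] ++ List.replicate kk [])
    ((L.getD kk []).reverse).map (fun s => PySem.Set.ofList s)

-- ===== PRECONDITION & SPEC =====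
-- Pre_ excludes exactly the inputs on which A raises ValueError: n < 0 or k < 0.
def Pre_k_subsets_i (n : Int) (k : Int) : Prop := 0 ≤ n ∧ 0 ≤ k
instance (n : Int) (k : Int) : Decidable (Pre_k_subsets_i n k) := by unfold Pre_k_subsets_i; infer_instance
def pvWitness_k_subsets_i : Int × Int := (4, 2)

def Spec_k_subsets_i (n : Int) (k : Int) (out : List (List Int)) : Prop := out = k_subsets_i_alt n k
instance (n : Int) (k : Int) (out : List (List Int)) : Decidable (Spec_k_subsets_i n k out) := by unfold Spec_k_subsets_i; infer_instance

-- ===== CLAIM (what is proved, stated in full; the proofs are below) =====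
def Claim_equal_k_subsets_i : Prop := ∀ (n : Int) (k : Int), Dom_k_subsets_i n k → Pre_k_subsets_i n k → Spec_k_subsets_i n k (k_subsets_i n k)

-- ===== LEMMAS AND PROOFS =====

-- the k-subsets of {0..n-1} as sorted lists, in colexicographic order (the common spec)
def pvColex : Nat → Nat → List (List Int)
  | _, 0 => [[]]
  | 0, _ + 1 => []
  | m + 1, j + 1 => pvColex m (j + 1) ++ (pvColex m j).map (fun s => s ++ [(m : Int)])

theorem pvColex_eq_nil {m j : Nat} (h : m < j) : pvColex m j = [] := by
  induction m generalizing j with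
  | zero => cases j with | zero => omega | succ j => rfl
  | succ m ih =>
    cases j with
    | zero => omega
    | succ j =>
      simp [pvColex, ih (by omega : m < j), ih (by omega : m < j + 1)]

theorem pvColex_bounded {m j : Nat} {s : List Int} (hs : s ∈ pvColex m j) :
    ∀ x ∈ s, x < (m : Int) := by
  induction m generalizing j s with
  | zero =>
    cases j with
    | zero => simp [pvColex] at hs; simp [hs]
    | succ j => simp [pvColex] at hs
  | succ m ih =>
    cases j with
    | zero =>
      simp [pvColex] at hs; simp [hs]
    | succ j =>
      simp [pvColex] at hs
      rcases hs with hs | ⟨t, ht, rfl⟩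
      · intro x hx
        have := ih hs x hx
        push_cast; omega
      · intro x hx
        simp at hx
        rcases hx with hx | rfl
        · have := ih ht x hx
          push_cast; omega
        · push_cast; omega

theorem pvColex_nodup {m j : Nat} {s : List Int} (hs : s ∈ pvColex m j) : s.Nodup := by
  induction m generalizing j s with
  | zero =>
    cases j with
    | zero => simp [pvColex] at hs; simp [hs]
    | succ j => simp [pvColex] at hs
  | succ m ih =>
    cases j with
    | zero => simp [pvColex] at hs; simp [hs]
    | succ j =>
      simp [pvColex] at hs
      rcases hs with hs | ⟨t, ht, rfl⟩
      · exact ih hs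
      · have hb := pvColex_bounded ht
        have hm : (m : Int) ∉ t := fun hmm => absurd (hb _ hmm) (by omega)
        simp only [List.nodup_append]
        refine ⟨ih ht, by simp, ?_⟩
        intro a ha b hb h
        rw [List.mem_singleton] at hb
        exact hm (hb ▸ h ▸ ha)

theorem pvColex_self (m : Nat) :
    pvColex m m = [(List.range m).map (fun i : Nat => (i : Int))] := by
  induction m with
  | zero => rfl
  | succ m ih =>
    simp [pvColex, pvColex_eq_nil (by omega : m < m + 1), ih, List.range_succ]

-- A's recursion produces exactly the reversed colex list
theorem kSubAuxA_eq (n k : Nat) (hk : 0 < k) (hkn : k ≤ n) :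
    kSubAuxA n k = (pvColex n k).reverse := by
  induction n generalizing k with
  | zero => omega
  | succ n ih =>
    rw [kSubAuxA]
    by_cases hnk : n + 1 = k
    · have h1 : ¬ (k = 0 ∨ n + 1 < k) := by omega
      subst hnk
      rw [if_neg h1, if_pos rfl, pvColex_self]
      have hnd : ((List.range (n+1)).map (fun i : Nat => (i : Int))).Nodup :=
        List.nodup_range.map Nat.cast_injective
      simp [PySem.Set.ofList_eq_self_of_nodup _ hnd]
    · have h1 : ¬ (k = 0 ∨ n + 1 < k) := by omega
      rw [if_neg h1, if_neg hnk]
      have hkn' : k ≤ n := by omega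
      -- second recursive call
      have h2 : kSubAuxA (n + 1 - 1) k = (pvColex n k).reverse := by
        simpa using ih k hk hkn'
      -- first recursive call: k - 1 may be 0
      have h3 : kSubAuxA (n + 1 - 1) (k - 1) = (pvColex n (k - 1)).reverse := by
        rcases Nat.eq_zero_or_pos (k - 1) with h0 | hpos
        · rw [h0]; rw [kSubAuxA]; simp [pvColex]
        · simpa using ih (k - 1) hpos (by omega)
      rw [h2, h3]
      -- Set.add appends since n is larger than every element
      have hmap : (pvColex n (k - 1)).reverse.map (fun s => PySem.Set.add s ((↑(n + 1) : Int) - 1))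
          = ((pvColex n (k - 1)).map (fun s => s ++ [(n : Int)])).reverse := by
        rw [List.map_reverse]
        congr 1
        apply List.map_congr_left
        intro s hs
        have hnot : ((↑(n + 1) : Int) - 1) ∉ s := by
          intro hmem
          have := pvColex_bounded hs _ hmem
          push_cast at this; omega
        rw [PySem.Set.add_of_not_mem hnot]
        congr 1
        push_cast; ring_nf
      rw [hmap]
      have : pvColex (n + 1) k = pvColex n k ++ (pvColex n (k - 1)).map (fun s => s ++ [(n : Int)]) := by
        cases k with
        | zero => omega
        | succ k => simp [pvColex]
      rw [this, List.reverse_append]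

-- B's DP state after processing 0..m-1 is the table j ↦ pvColex m j
theorem kSubFold_eq (k : Nat) (m : Nat) :
    (List.range m).foldl (fun L (i : Nat) => kSubStepB k (i : Int) L) ([[[]]] ++ List.replicate k [])
      = (List.range (k + 1)).map (fun j => pvColex m j) := by
  induction m with
  | zero =>
    rw [List.range_zero, List.foldl_nil, List.range_succ_eq_map, List.map_cons, List.map_map]
    simp [Function.comp_def, pvColex, List.map_const']
  | succ m ih =>
    rw [List.range_succ, List.foldl_append, List.foldl_cons, List.foldl_nil, ih]
    unfold kSubStepB
    conv_rhs => rw [List.range_succ_eq_map, List.map_cons, List.map_map]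
    rw [List.singleton_append]
    congr 1
    · rw [PySem.List.getD_map_range _ _ _ _ (by omega : 0 < k + 1)]
      simp [pvColex]
    · refine List.map_congr_left ?_
      intro j hj
      simp only [List.mem_range] at hj
      rw [PySem.List.getD_map_range _ _ _ _ (by omega : j + 1 < k + 1),
          PySem.List.getD_map_range _ _ _ _ (by omega : j < k + 1)]
      simp [pvColex]

-- members of pvColex are already duplicate-free lists, so set(s) leaves them unchanged
theorem map_ofList_pvColex (m j : Nat) :
    ((pvColex m j).reverse).map (fun s => PySem.Set.ofList s) = (pvColex m j).reverse := by
  conv_rhs => rw [← List.map_id ((pvColex m j).reverse)]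
  apply List.map_congr_left
  intro s hs
  rw [List.mem_reverse] at hs
  exact PySem.Set.ofList_eq_self_of_nodup _ (pvColex_nodup hs)

-- ===== VERDICT (by name: the statement is the Claim_ definition above) =====
theorem k_subsets_i_spec : Claim_equal_k_subsets_i := by
  intro n k _ hpre
  obtain ⟨hn, hk⟩ := hpre
  unfold Spec_k_subsets_i k_subsets_i k_subsets_i_alt
  rw [if_neg (by omega), if_neg (by omega), if_neg (by omega), if_neg (by omega)]
  by_cases hb : k = 0 ∨ n < k
  · rw [if_pos hb, kSubAuxA]
    rw [if_pos (by omega : k.toNat = 0 ∨ n.toNat < k.toNat)]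
  · rw [if_neg hb]
    have hk0 : 0 < k.toNat := by omega
    have hkn : k.toNat ≤ n.toNat := by omega
    rw [kSubAuxA_eq _ _ hk0 hkn]
    simp only []
    rw [kSubFold_eq k.toNat n.toNat]
    rw [PySem.List.getD_map_range _ _ _ _ (by omega : k.toNat < k.toNat + 1), map_ofList_pvColex]
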